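-- pv_equiv track=rewrite | github.com/tamirat-wubie/mullu-control-plane | scripts/validate_deployment_publication_closure.py | _bounded_report_error_detail
-- ===== SOURCE A (Python) =====
-- REQUIRED_PUBLISHED_FIELDS = (
--     "witness_id",
--     "gateway_url",
--     "public_health_endpoint",
--     "health_http_status",
--     "health_response_digest",
--     "deployment_claim",
--     "health_status",
--     "runtime_witness_status",
--     "signature_status",
--     "conformance_status",
--     "conformance_signature_status",
--     "latest_conformance_certificate_id",
--     "latest_terminal_certificate_id",
--     "latest_command_event_hash",
--     "runtime_witness_id",
--     "runtime_environment",
--     "runtime_signature_key_id",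
--     "runtime_responsibility_debt_clear",
--     "authority_responsibility_debt_clear",
--     "authority_pending_approval_chain_count",
--     "authority_overdue_approval_chain_count",
--     "authority_open_obligation_count",
--     "authority_overdue_obligation_count",
--     "authority_escalated_obligation_count",
--     "authority_unowned_high_risk_capability_count",
--     "steps",
-- )
--
-- def _bounded_report_error_detail(error_detail: str) -> str:
--     if error_detail.startswith("schema contract:"):
--         return "schema contract validation failed"
--     if error_detail.startswith("deployment witness state is unsupported"):
--         return "deployment witness state is unsupported"
--     if error_detail.startswith("missing published witness fields:"):
--         return error_detail
--     if error_detail in {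
--         "deployment status document missing",
--         "not-published deployment must keep public production health endpoint not-declared",
--         "published witness conflicts with not-published status",
--         "published deployment requires a declared public health endpoint",
--         "published deployment requires witness artifact",
--         "witness JSON parse failed",
--         "witness JSON root must be an object",
--         "published gateway_url must not be localhost",
--         "published gateway_url must use https",
--         "health_response_digest must be a sha256 digest",
--         "authority responsibility debt must be clear",
--         "runtime responsibility debt must be clear",
--         "steps must be a non-empty list",
--         "published witness requires passing gateway health step",
--         "public production health endpoint must use https",
--     }:
--         return error_detail
--     if error_detail.startswith("DEPLOYMENT_STATUS.md missing field:"):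
--         return error_detail
--     if error_detail.startswith("health_http_status "):
--         return "health_http_status mismatch"
--     if error_detail.startswith("witness step failed:"):
--         return "witness step failed"
--     if error_detail.startswith("steps[") and error_detail.endswith(" must be an object"):
--         return "witness step malformed"
--     if error_detail.startswith("witness public health endpoint does not match"):
--         return "witness public health endpoint mismatch"
--     if error_detail.startswith("public production health endpoint does not match"):
--         return "public production health endpoint mismatch"
--     if " != " in error_detail:
--         field_name = error_detail.split(" ", 1)[0]
--         if field_name in REQUIRED_PUBLISHED_FIELDS:
--             return f"{field_name} mismatch"
--     if error_detail.endswith(" must be non-empty"):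
--         field_name = error_detail.removesuffix(" must be non-empty")
--         if field_name in REQUIRED_PUBLISHED_FIELDS:
--             return error_detail
--     for field_name in (
--         "authority_overdue_approval_chain_count",
--         "authority_overdue_obligation_count",
--         "authority_escalated_obligation_count",
--         "authority_unowned_high_risk_capability_count",
--     ):
--         if error_detail.startswith(f"{field_name} "):
--             return f"{field_name} must be zero"
--     return "deployment publication closure validation failed"
-- ===== SOURCE B (Python) =====
-- REQUIRED_PUBLISHED_FIELDS = (
--     "witness_id",
--     "gateway_url",
--     "public_health_endpoint",
--     "health_http_status",
--     "health_response_digest",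
--     "deployment_claim",
--     "health_status",
--     "runtime_witness_status",
--     "signature_status",
--     "conformance_status",
--     "conformance_signature_status",
--     "latest_conformance_certificate_id",
--     "latest_terminal_certificate_id",
--     "latest_command_event_hash",
--     "runtime_witness_id",
--     "runtime_environment",
--     "runtime_signature_key_id",
--     "runtime_responsibility_debt_clear",
--     "authority_responsibility_debt_clear",
--     "authority_pending_approval_chain_count",
--     "authority_overdue_approval_chain_count",
--     "authority_open_obligation_count",
--     "authority_overdue_obligation_count",
--     "authority_escalated_obligation_count",
--     "authority_unowned_high_risk_capability_count",
--     "steps",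
-- )
--
-- _EXACT_MESSAGES = frozenset({
--     "deployment status document missing",
--     "not-published deployment must keep public production health endpoint not-declared",
--     "published witness conflicts with not-published status",
--     "published deployment requires a declared public health endpoint",
--     "published deployment requires witness artifact",
--     "witness JSON parse failed",
--     "witness JSON root must be an object",
--     "published gateway_url must not be localhost",
--     "published gateway_url must use https",
--     "health_response_digest must be a sha256 digest",
--     "authority responsibility debt must be clear",
--     "runtime responsibility debt must be clear",
--     "steps must be a non-empty list",
--     "published witness requires passing gateway health step",
--     "public production health endpoint must use https",
-- })
--
-- # Ordered, data-driven rule table interpreted by one loop; each entry is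
-- # (kind, argument, output).  The first rule that yields a non-None result wins.
-- _RULES = (
--     ("prefix", "schema contract:", "schema contract validation failed"),
--     ("prefix", "deployment witness state is unsupported",
--      "deployment witness state is unsupported"),
--     ("prefix_echo", "missing published witness fields:", None),
--     ("exact_echo", None, None),
--     ("prefix_echo", "DEPLOYMENT_STATUS.md missing field:", None),
--     ("prefix", "health_http_status ", "health_http_status mismatch"),
--     ("prefix", "witness step failed:", "witness step failed"),
--     ("wrap", ("steps[", " must be an object"), "witness step malformed"),
--     ("prefix", "witness public health endpoint does not match",
--      "witness public health endpoint mismatch"),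
--     ("prefix", "public production health endpoint does not match",
--      "public production health endpoint mismatch"),
--     ("mismatch", None, None),
--     ("nonempty", None, None),
--     ("zero", "authority_overdue_approval_chain_count", None),
--     ("zero", "authority_overdue_obligation_count", None),
--     ("zero", "authority_escalated_obligation_count", None),
--     ("zero", "authority_unowned_high_risk_capability_count", None),
-- )
--
--
-- def _apply_rule(rule, s):
--     kind, arg, out = rule
--     if kind == "prefix":
--         return out if s.startswith(arg) else None
--     if kind == "prefix_echo":
--         return s if s.startswith(arg) else None
--     if kind == "exact_echo":
--         return s if s in _EXACT_MESSAGES else None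
--     if kind == "wrap":
--         pre, suf = arg
--         return out if s.startswith(pre) and s.endswith(suf) else None
--     if kind == "mismatch":
--         if " != " in s:
--             field_name = s.split(" ", 1)[0]
--             if field_name in REQUIRED_PUBLISHED_FIELDS:
--                 return field_name + " mismatch"
--         return None
--     if kind == "nonempty":
--         if s.endswith(" must be non-empty"):
--             field_name = s.removesuffix(" must be non-empty")
--             if field_name in REQUIRED_PUBLISHED_FIELDS:
--                 return s
--         return None
--     # kind == "zero"
--     return arg + " must be zero" if s.startswith(arg + " ") else None
--
--
-- def _bounded_report_error_detail(error_detail: str) -> str: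
--     for rule in _RULES:
--         result = _apply_rule(rule, error_detail)
--         if result is not None:
--             return result
--     return "deployment publication closure validation failed"
-- ===== Notes on version B (the rewrite author's own statement) =====
-- stated objective: alternative
-- what changed: Replaced A's hard-coded chain of if-statements by an ordered data-driven rule table (tagged rules: prefix, echo, exact-set, wrap, mismatch, non-empty, must-be-zero) interpreted by a single first-match loop.
import Mathlib
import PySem

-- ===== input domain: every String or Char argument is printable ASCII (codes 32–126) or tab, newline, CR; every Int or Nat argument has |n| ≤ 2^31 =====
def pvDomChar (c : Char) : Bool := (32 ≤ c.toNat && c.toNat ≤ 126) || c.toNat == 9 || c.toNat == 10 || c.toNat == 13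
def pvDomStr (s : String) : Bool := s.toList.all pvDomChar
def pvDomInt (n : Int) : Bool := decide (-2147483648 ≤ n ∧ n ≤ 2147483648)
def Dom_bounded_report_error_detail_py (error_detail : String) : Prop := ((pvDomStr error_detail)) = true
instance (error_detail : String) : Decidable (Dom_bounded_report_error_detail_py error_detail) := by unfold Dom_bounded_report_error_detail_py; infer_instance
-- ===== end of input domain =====

-- B replaces A's long if-chain by an ordered data-driven rule table interpreted by one loop (objective: alternative decomposition; same cost).


-- shared constants (module-level constants of the Python file)
def pvRequiredFields : List String :=
  ["witness_id", "gateway_url", "public_health_endpoint", "health_http_status",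
   "health_response_digest", "deployment_claim", "health_status", "runtime_witness_status",
   "signature_status", "conformance_status", "conformance_signature_status",
   "latest_conformance_certificate_id", "latest_terminal_certificate_id",
   "latest_command_event_hash", "runtime_witness_id", "runtime_environment",
   "runtime_signature_key_id", "runtime_responsibility_debt_clear",
   "authority_responsibility_debt_clear", "authority_pending_approval_chain_count",
   "authority_overdue_approval_chain_count", "authority_open_obligation_count",
   "authority_overdue_obligation_count", "authority_escalated_obligation_count",
   "authority_unowned_high_risk_capability_count", "steps"]

def pvExactMessages : List String :=
  ["deployment status document missing",
   "not-published deployment must keep public production health endpoint not-declared",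
   "published witness conflicts with not-published status",
   "published deployment requires a declared public health endpoint",
   "published deployment requires witness artifact",
   "witness JSON parse failed",
   "witness JSON root must be an object",
   "published gateway_url must not be localhost",
   "published gateway_url must use https",
   "health_response_digest must be a sha256 digest",
   "authority responsibility debt must be clear",
   "runtime responsibility debt must be clear",
   "steps must be a non-empty list",
   "published witness requires passing gateway health step",
   "public production health endpoint must use https"]

-- s.split(" ", 1)[0] — splitMax? with sep " " ≠ "" is always `some` of a non-empty list,
-- so the defaults are unreachable (exact on every input)
def pvFirstField (s : String) : String :=
  ((PySem.Str.splitMax? s " " 1).getD []).headD ""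

-- s.removesuffix(suf) — exact hand port: drop the suffix iff it is present
def pvRemoveSuffix (s suf : String) : String :=
  if PySem.Str.endswith s suf then String.ofList (s.toList.take (s.toList.length - suf.toList.length)) else s

-- ===== PORT A =====
-- A's final 'for field_name in (...)' loop: first matching prefix wins, else the default
def pvA_zero : List String → String → String
  | [], _ => "deployment publication closure validation failed"
  | f :: rest, s =>
      if PySem.Str.startswith s (f ++ " ") then f ++ " must be zero" else pvA_zero rest s

def pvZeroFields : List String :=
  ["authority_overdue_approval_chain_count", "authority_overdue_obligation_count",
   "authority_escalated_obligation_count", "authority_unowned_high_risk_capability_count"]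

-- A's ' must be non-empty' block with fall-through to the zero loop
def pvA_nonempty (s : String) : String :=
  if PySem.Str.endswith s " must be non-empty" then
    let field_name := pvRemoveSuffix s " must be non-empty"
    if pvRequiredFields.contains field_name then s else pvA_zero pvZeroFields s
  else pvA_zero pvZeroFields s

-- A's ' != ' block with fall-through to the non-empty block
def pvA_mismatch (s : String) : String :=
  if PySem.Str.isIn " != " s then
    let field_name := pvFirstField s
    if pvRequiredFields.contains field_name then field_name ++ " mismatch" else pvA_nonempty s
  else pvA_nonempty s

def bounded_report_error_detail_py (error_detail : String) : String :=
  if PySem.Str.startswith error_detail "schema contract:" then "schema contract validation failed"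
  else if PySem.Str.startswith error_detail "deployment witness state is unsupported" then
    "deployment witness state is unsupported"
  else if PySem.Str.startswith error_detail "missing published witness fields:" then error_detail
  else if pvExactMessages.contains error_detail then error_detail
  else if PySem.Str.startswith error_detail "DEPLOYMENT_STATUS.md missing field:" then error_detail
  else if PySem.Str.startswith error_detail "health_http_status " then "health_http_status mismatch"
  else if PySem.Str.startswith error_detail "witness step failed:" then "witness step failed"
  else if PySem.Str.startswith error_detail "steps[" && PySem.Str.endswith error_detail " must be an object" then
    "witness step malformed"
  else if PySem.Str.startswith error_detail "witness public health endpoint does not match" then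
    "witness public health endpoint mismatch"
  else if PySem.Str.startswith error_detail "public production health endpoint does not match" then
    "public production health endpoint mismatch"
  else pvA_mismatch error_detail

-- ===== PORT B =====
inductive PvRule where
  | prefix : String → String → PvRule
  | prefixEcho : String → PvRule
  | exactEcho : PvRule
  | wrap : String → String → String → PvRule
  | mismatch : PvRule
  | nonempty : PvRule
  | zero : String → PvRule
deriving DecidableEq, Repr

def pvApplyRule (r : PvRule) (s : String) : Option String :=
  match r with
  | .prefix p out => if PySem.Str.startswith s p then some out else none
  | .prefixEcho p => if PySem.Str.startswith s p then some s else none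
  | .exactEcho => if pvExactMessages.contains s then some s else none
  | .wrap pre suf out =>
      if PySem.Str.startswith s pre && PySem.Str.endswith s suf then some out else none
  | .mismatch =>
      if PySem.Str.isIn " != " s then
        let field_name := pvFirstField s
        if pvRequiredFields.contains field_name then some (field_name ++ " mismatch") else none
      else none
  | .nonempty =>
      if PySem.Str.endswith s " must be non-empty" then
        let field_name := pvRemoveSuffix s " must be non-empty"
        if pvRequiredFields.contains field_name then some s else none
      else none
  | .zero f => if PySem.Str.startswith s (f ++ " ") then some (f ++ " must be zero") else none

def pvRules : List PvRule :=
  [.prefix "schema contract:" "schema contract validation failed",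
   .prefix "deployment witness state is unsupported" "deployment witness state is unsupported",
   .prefixEcho "missing published witness fields:",
   .exactEcho,
   .prefixEcho "DEPLOYMENT_STATUS.md missing field:",
   .prefix "health_http_status " "health_http_status mismatch",
   .prefix "witness step failed:" "witness step failed",
   .wrap "steps[" " must be an object" "witness step malformed",
   .prefix "witness public health endpoint does not match" "witness public health endpoint mismatch",
   .prefix "public production health endpoint does not match" "public production health endpoint mismatch",
   .mismatch,
   .nonempty,
   .zero "authority_overdue_approval_chain_count",
   .zero "authority_overdue_obligation_count",
   .zero "authority_escalated_obligation_count",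
   .zero "authority_unowned_high_risk_capability_count"]

def pvRunRules : List PvRule → String → String
  | [], _ => "deployment publication closure validation failed"
  | r :: rest, s =>
      match pvApplyRule r s with
      | some v => v
      | none => pvRunRules rest s

def bounded_report_error_detail_py_alt (error_detail : String) : String :=
  pvRunRules pvRules error_detail

-- ===== PRECONDITION & SPEC =====
def Spec_bounded_report_error_detail_py (error_detail : String) (out : String) : Prop := out = bounded_report_error_detail_py_alt error_detail
instance (error_detail : String) (out : String) : Decidable (Spec_bounded_report_error_detail_py error_detail out) := by unfold Spec_bounded_report_error_detail_py; infer_instance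

-- ===== CLAIM (what is proved, stated in full; the proofs are below) =====
def Claim_equal_bounded_report_error_detail_py : Prop := ∀ (error_detail : String), Dom_bounded_report_error_detail_py error_detail → Spec_bounded_report_error_detail_py error_detail (bounded_report_error_detail_py error_detail)

-- ===== LEMMAS AND PROOFS =====

theorem pvRun_nil (s : String) : pvRunRules [] s = "deployment publication closure validation failed" := rfl

theorem pvRun_cons (r : PvRule) (rest : List PvRule) (s : String) :
    pvRunRules (r :: rest) s = (pvApplyRule r s).getD (pvRunRules rest s) := by
  cases h : pvApplyRule r s <;> simp [pvRunRules, h]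

theorem pvGetD_ite (c : Bool) (o o' : Option String) (e : String) :
    (if c then o else o').getD e = if c then o.getD e else o'.getD e := by
  cases c <;> rfl

-- ===== VERDICT (by name: the statement is the Claim_ definition above) =====
theorem bounded_report_error_detail_py_spec : Claim_equal_bounded_report_error_detail_py := by
  intro s _
  show bounded_report_error_detail_py s = bounded_report_error_detail_py_alt s
  simp only [bounded_report_error_detail_py_alt, pvRules, pvRun_cons, pvRun_nil, pvApplyRule,
    pvGetD_ite, Option.getD_some, Option.getD_none, bounded_report_error_detail_py,
    pvA_mismatch, pvA_nonempty, pvA_zero, pvZeroFields]
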